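-- pv_equiv track=rewrite | github.com/vvchldmsdn/algorithms | nexon/3.py | getMinimumHealth
-- ===== SOURCE A (Python) =====
-- def getMinimumHealth(initial_players, new_players, rank):
--     players = initial_players + new_players
--     players.sort()
--
--     new_idx = len(new_players) - 1
--
--     result = players[-rank]
--
--     while new_idx >= 0:
--         del players[players.index(new_players[new_idx])]
--         new_idx -= 1
--         result += players[-rank]
--
--     return result
-- ===== SOURCE B (Python) =====
-- def getMinimumHealth(initial_players, new_players, rank):
--     # Forward pass: sort only the initial players, then add each new player in
--     # arrival order with a binary-search insertion, accumulating the rank-th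
--     # value after each insertion (A instead sorts everything and deletes the
--     # new players back-to-front with a linear index() scan each time).
--     players = sorted(initial_players)
--     total = players[-rank]
--     for v in new_players:
--         lo, hi = 0, len(players)
--         while lo < hi:
--             mid = (lo + hi) // 2
--             if players[mid] < v:
--                 lo = mid + 1
--             else:
--                 hi = mid
--         players.insert(lo, v)
--         total += players[-rank]
--     return total
-- ===== Notes on version B (the rewrite author's own statement) =====
-- stated objective: faster
-- what changed: Instead of sorting the full list and deleting new players back-to-front with a linear .index() scan per step, B sorts only the initial players and inserts each new player in arrival order at a binary-search position, accumulating the rank-th value after each insertion.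
import Mathlib
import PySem

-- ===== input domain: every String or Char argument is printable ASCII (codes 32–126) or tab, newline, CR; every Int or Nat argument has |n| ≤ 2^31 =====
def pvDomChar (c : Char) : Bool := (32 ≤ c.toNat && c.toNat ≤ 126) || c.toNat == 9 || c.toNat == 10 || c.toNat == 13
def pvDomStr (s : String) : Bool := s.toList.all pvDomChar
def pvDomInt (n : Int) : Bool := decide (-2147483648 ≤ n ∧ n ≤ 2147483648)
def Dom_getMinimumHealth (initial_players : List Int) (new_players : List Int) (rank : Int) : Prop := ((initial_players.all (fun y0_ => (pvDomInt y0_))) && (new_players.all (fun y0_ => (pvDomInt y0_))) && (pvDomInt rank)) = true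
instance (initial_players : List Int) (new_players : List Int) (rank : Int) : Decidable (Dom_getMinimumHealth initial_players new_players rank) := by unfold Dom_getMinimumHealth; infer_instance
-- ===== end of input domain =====

-- B replaces A's sort-everything-then-delete-backwards-with-.index() pass by a forward pass that
-- binary-search-inserts each new player into the sorted initial players (measured faster; constant-factor).

-- ===== PORT A =====
-- A's while-loop walks new_idx = len(new_players)-1 .. 0, i.e. it processes new_players.reverse.
def pvALoop (rank : Int) : List Int → List Int → Int → Int
  | _, [], result => result
  | players, v :: rest, result =>
      -- del players[players.index(v)]
      let i : Nat := (PySem.List.index? players v).getD 0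
      let players' := ((PySem.List.pop? players (i : Int)).map Prod.snd).getD players
      pvALoop rank players' rest (result + PySem.List.pyGetD players' (-rank) 0)

def getMinimumHealth (initial_players : List Int) (new_players : List Int) (rank : Int) : Int :=
  let players := PySem.List.sorted (initial_players ++ new_players) (fun x => x)
  let result := PySem.List.pyGetD players (-rank) 0
  pvALoop rank players new_players.reverse result

-- ===== PORT B =====
-- Source B's hand-written binary-search loop; lo, hi are nonnegative, so Nat '/' is exactly (lo+hi)//2.
def pvBSearch (players : List Int) (v : Int) (lo hi : Nat) : Nat :=
  if h : lo < hi then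
    let mid := (lo + hi) / 2
    if players.getD mid 0 < v then pvBSearch players v (mid + 1) hi
    else pvBSearch players v lo mid
  else lo
termination_by hi - lo
decreasing_by all_goals omega

def pvBLoop (rank : Int) : List Int → List Int → Int → Int
  | _, [], total => total
  | players, v :: rest, total =>
      let lo := pvBSearch players v 0 players.length
      let players' := PySem.List.insert players (lo : Int) v
      pvBLoop rank players' rest (total + PySem.List.pyGetD players' (-rank) 0)

def getMinimumHealth_alt (initial_players : List Int) (new_players : List Int) (rank : Int) : Int :=
  let players := PySem.List.sorted initial_players (fun x => x)
  let total := PySem.List.pyGetD players (-rank) 0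
  pvBLoop rank players new_players total

-- ===== PRECONDITION & SPEC =====
-- A raises IndexError iff players[-rank] goes out of range at some step; the shortest list seen has
-- length initial_players.length, so A returns exactly when 1 - len(initial) ≤ rank ≤ len(initial).
def Pre_getMinimumHealth (initial_players : List Int) (new_players : List Int) (rank : Int) : Prop :=
  1 - (initial_players.length : Int) ≤ rank ∧ rank ≤ (initial_players.length : Int)
instance (initial_players : List Int) (new_players : List Int) (rank : Int) : Decidable (Pre_getMinimumHealth initial_players new_players rank) := by unfold Pre_getMinimumHealth; infer_instance

def pvWitness_getMinimumHealth : List Int × List Int × Int := ([1, 2], [3], 1)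

def Spec_getMinimumHealth (initial_players : List Int) (new_players : List Int) (rank : Int) (out : Int) : Prop := out = getMinimumHealth_alt initial_players new_players rank
instance (initial_players : List Int) (new_players : List Int) (rank : Int) (out : Int) : Decidable (Spec_getMinimumHealth initial_players new_players rank out) := by unfold Spec_getMinimumHealth; infer_instance

-- ===== CLAIM (what is proved, stated in full; the proofs are below) =====
def Claim_equal_getMinimumHealth : Prop := ∀ (initial_players : List Int) (new_players : List Int) (rank : Int), Dom_getMinimumHealth initial_players new_players rank → Pre_getMinimumHealth initial_players new_players rank → Spec_getMinimumHealth initial_players new_players rank (getMinimumHealth initial_players new_players rank)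

-- ===== LEMMAS AND PROOFS =====

-- The sorted multiset both loops maintain, and the value added at each step.
def pvCanon (xs : List Int) : List Int := PySem.List.sorted xs (fun x => x)
def pvT (rank : Int) (zs : List Int) : Int := PySem.List.pyGetD (pvCanon zs) (-rank) 0

def pvSumA (rank : Int) (ys : List Int) : List Int → Int
  | [] => 0
  | _ :: rest => pvT rank (ys ++ rest.reverse) + pvSumA rank ys rest

def pvSumB (rank : Int) (ys : List Int) : List Int → Int
  | [] => 0
  | v :: rest => pvT rank (ys ++ [v]) + pvSumB rank (ys ++ [v]) rest

lemma pvCanon_pairwise (xs : List Int) : (pvCanon xs).Pairwise (· ≤ ·) :=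
  PySem.List.sorted_pairwise xs (fun x => x)

lemma pvCanon_perm (xs : List Int) : (pvCanon xs).Perm xs :=
  PySem.List.sorted_perm xs (fun x => x) false

lemma pvCanon_eq {l zs : List Int} (h1 : l.Perm zs) (h2 : l.Pairwise (· ≤ ·)) : pvCanon zs = l :=
  PySem.List.eq_of_perm_of_pairwise_le_of_injective (fun x => x) (fun _ _ h => h)
    ((pvCanon_perm zs).trans h1.symm) (pvCanon_pairwise zs) h2

-- A's body on the canonical state: deleting v at its first index yields the canonical state without v.
lemma pvAStep (zs ys : List Int) (v : Int) (hp : zs.Perm (v :: ys)) :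
    ((PySem.List.pop? (pvCanon zs) (((PySem.List.index? (pvCanon zs) v).getD 0 : Nat) : Int)).map
      Prod.snd).getD (pvCanon zs) = pvCanon ys := by
  have hv : v ∈ pvCanon zs := (pvCanon_perm zs).mem_iff.2 (hp.mem_iff.2 (List.mem_cons_self ..))
  obtain ⟨k, hk⟩ := (PySem.List.index?_isSome_iff (pvCanon zs) v).2 hv |> Option.isSome_iff_exists.1
  obtain ⟨pre, suf, hsplit, hlen, -⟩ := (PySem.List.index?_eq_some_iff _ _ _).1 hk
  have hklt : k < (pvCanon zs).length := by rw [hsplit, ← hlen]; simp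
  rw [hk]
  simp only [Option.getD_some]
  rw [PySem.List.pop?_natCast _ k hklt]
  simp only [Option.map_some, Option.getD_some]
  have herase : (pvCanon zs).eraseIdx k = pre ++ suf := by
    rw [hsplit, ← hlen, List.eraseIdx_append_of_length_le (by omega)]
    simp
  rw [herase]
  symm
  apply pvCanon_eq
  · -- (pre ++ suf).Perm ys
    have h1 : (pvCanon zs).Perm (v :: (pre ++ suf)) := by rw [hsplit]; exact List.perm_middle
    have h2 : (v :: (pre ++ suf)).Perm (v :: ys) := (h1.symm.trans ((pvCanon_perm zs).trans hp))
    exact h2.cons_inv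
  · -- sorted: pre ++ suf is a sublist of pre ++ v :: suf
    have hsub : (pre ++ suf).Sublist (pvCanon zs) := by
      rw [hsplit]; exact (List.sublist_cons_self v suf).append_left pre
    exact (pvCanon_pairwise zs).sublist hsub

-- Source B's binary search finds the left insertion point.
lemma pvBSearch_spec (s : List Int) (v : Int) (hs : s.Pairwise (· ≤ ·)) :
    ∀ (n lo hi : Nat), hi - lo ≤ n → lo ≤ hi → hi ≤ s.length →
    (∀ i (h : i < s.length), i < lo → s[i] < v) →
    (∀ i (h : i < s.length), hi ≤ i → v ≤ s[i]) →
    pvBSearch s v lo hi ≤ s.length ∧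
    (∀ i (h : i < s.length), i < pvBSearch s v lo hi → s[i] < v) ∧
    (∀ i (h : i < s.length), pvBSearch s v lo hi ≤ i → v ≤ s[i]) := by
  intro n
  induction n with
  | zero =>
    intro lo hi hfuel hlh hhl hlow hup
    have : ¬ lo < hi := by omega
    rw [pvBSearch, dif_neg this]
    exact ⟨by omega, fun i h hi => hlow i h hi, fun i h hi => hup i h (by omega)⟩
  | succ n ih =>
    intro lo hi hfuel hlh hhl hlow hup
    rw [pvBSearch]
    by_cases hcond : lo < hi
    · rw [dif_pos hcond]
      have hmidlt : (lo + hi) / 2 < s.length := by omega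
      have hget : s.getD ((lo + hi) / 2) 0 = s[(lo + hi) / 2] := List.getD_eq_getElem s 0 hmidlt
      simp only [hget]
      by_cases hc : s[(lo + hi) / 2] < v
      · rw [if_pos hc]
        apply ih ((lo + hi) / 2 + 1) hi (by omega) (by omega) hhl
        · intro i h hi'
          rcases Nat.lt_or_ge i ((lo + hi) / 2) with h1 | h1
          · calc s[i] ≤ s[(lo + hi) / 2] := List.pairwise_iff_getElem.1 hs i _ h hmidlt h1
              _ < v := hc
          · have : i = (lo + hi) / 2 := by omega
            subst this; exact hc
        · exact hup
      · rw [if_neg hc]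
        apply ih lo ((lo + hi) / 2) (by omega) (by omega) (by omega) hlow
        intro i h hi'
        rcases Nat.lt_or_ge ((lo + hi) / 2) i with h1 | h1
        · calc v ≤ s[(lo + hi) / 2] := by omega
            _ ≤ s[i] := List.pairwise_iff_getElem.1 hs _ i hmidlt h h1
        · have : i = (lo + hi) / 2 := by omega
          subst this; omega
    · rw [dif_neg hcond]
      exact ⟨by omega, fun i h hi => hlow i h hi, fun i h hi => hup i h (by omega)⟩

-- B's body on the canonical state: binary-search insertion of v yields the canonical state with v.
lemma pvBStep (ys : List Int) (v : Int) :
    PySem.List.insert (pvCanon ys) ((pvBSearch (pvCanon ys) v 0 (pvCanon ys).length : Nat) : Int) v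
      = pvCanon (ys ++ [v]) := by
  set s := pvCanon ys with hsdef
  have hs : s.Pairwise (· ≤ ·) := pvCanon_pairwise ys
  obtain ⟨hle, hlow, hup⟩ := pvBSearch_spec s v hs s.length 0 s.length (by omega) (by omega)
    (le_refl _) (by omega) (fun i h hi => absurd hi (by omega))
  set j := pvBSearch s v 0 s.length with hjdef
  rw [PySem.List.insert_natCast s j v hle]
  symm
  apply pvCanon_eq
  · -- perm to ys ++ [v]
    have hperm : (s.take j ++ v :: s.drop j).Perm (v :: s) := by
      have h := List.perm_middle (a := v) (l₁ := s.take j) (l₂ := s.drop j)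
      rwa [List.take_append_drop] at h
    exact hperm.trans (((pvCanon_perm ys).cons v).trans (List.perm_append_singleton v ys).symm)
  · -- sorted
    rw [List.pairwise_append]
    refine ⟨hs.sublist (List.take_sublist j s), ?_, ?_⟩
    · rw [List.pairwise_cons]
      refine ⟨?_, hs.sublist (List.drop_sublist j s)⟩
      intro b hb
      obtain ⟨i, hi, rfl⟩ := List.mem_iff_getElem.1 hb
      rw [List.getElem_drop]
      exact hup _ (by simp at hi; omega) (by omega)
    · intro a ha b hb
      obtain ⟨i, hi, rfl⟩ := List.mem_iff_getElem.1 ha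
      rw [List.getElem_take]
      have hav : s[i]'(by simp at hi; omega) < v := hlow i (by simp at hi; omega) (by simp at hi; omega)
      rcases List.mem_cons.1 hb with rfl | hb'
      · exact le_of_lt hav
      · obtain ⟨i', hi', rfl⟩ := List.mem_iff_getElem.1 hb'
        rw [List.getElem_drop]
        exact le_of_lt (lt_of_lt_of_le hav (hup _ (by simp at hi'; omega) (by omega)))

-- A's loop, on the canonical state that still contains the players of rl (to be removed).
lemma pvALoop_eq (rank : Int) :
    ∀ (rl : List Int) (ys : List Int) (r : Int),
      pvALoop rank (pvCanon (ys ++ rl.reverse)) rl r = r + pvSumA rank ys rl := by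
  intro rl
  induction rl with
  | nil => intro ys r; simp [pvALoop, pvSumA]
  | cons v rest ih =>
    intro ys r
    rw [pvALoop]
    have hzs : (ys ++ (v :: rest).reverse).Perm (v :: (ys ++ rest.reverse)) := by
      simp only [List.reverse_cons, ← List.append_assoc]
      exact List.perm_append_singleton v (ys ++ rest.reverse)
    rw [pvAStep _ _ _ hzs, ih]
    show r + pvT rank (ys ++ rest.reverse) + pvSumA rank ys rest = r + pvSumA rank ys (v :: rest)
    rw [pvSumA]; ring

-- B's loop on the canonical state already built so far.
lemma pvBLoop_eq (rank : Int) :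
    ∀ (l : List Int) (ys : List Int) (tot : Int),
      pvBLoop rank (pvCanon ys) l tot = tot + pvSumB rank ys l := by
  intro l
  induction l with
  | nil => intro ys tot; simp [pvBLoop, pvSumB]
  | cons v rest ih =>
    intro ys tot
    rw [pvBLoop]
    show pvBLoop rank (PySem.List.insert (pvCanon ys) _ v) rest
        (tot + PySem.List.pyGetD (PySem.List.insert (pvCanon ys) _ v) (-rank) 0)
      = tot + pvSumB rank ys (v :: rest)
    rw [pvBStep, ih]
    show tot + pvT rank (ys ++ [v]) + pvSumB rank (ys ++ [v]) rest = tot + pvSumB rank ys (v :: rest)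
    rw [pvSumB]; ring

lemma pvSumB_append (rank : Int) :
    ∀ (l ys : List Int) (v : Int),
      pvSumB rank ys (l ++ [v]) = pvSumB rank ys l + pvT rank (ys ++ l ++ [v]) := by
  intro l
  induction l with
  | nil => intro ys v; simp [pvSumB]
  | cons w rest ih =>
    intro ys v
    show pvT rank (ys ++ [w]) + pvSumB rank (ys ++ [w]) (rest ++ [v])
      = pvSumB rank ys (w :: rest) + pvT rank (ys ++ (w :: rest) ++ [v])
    rw [ih, pvSumB]
    have : ys ++ [w] ++ rest ++ [v] = ys ++ (w :: rest) ++ [v] := by simp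
    rw [this]; ring

-- The two loops add the same terms, in opposite orders.
lemma pvSum_rev (rank : Int) :
    ∀ (l ys : List Int),
      pvT rank (ys ++ l) + pvSumA rank ys l.reverse = pvT rank ys + pvSumB rank ys l := by
  intro l
  induction l using List.reverseRecOn with
  | nil => intro ys; simp [pvSumA, pvSumB]
  | append_singleton l' v ih =>
    intro ys
    rw [List.reverse_append, List.reverse_singleton, List.singleton_append, pvSumA,
      List.reverse_reverse, pvSumB_append]
    have h1 : pvT rank (ys ++ l') + pvSumA rank ys l'.reverse = pvT rank ys + pvSumB rank ys l' :=
      ih ys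
    have h2 : ys ++ (l' ++ [v]) = ys ++ l' ++ [v] := by simp
    rw [h2]; omega

-- ===== VERDICT (by name: the statement is the Claim_ definition above) =====
theorem getMinimumHealth_spec : Claim_equal_getMinimumHealth := by
  intro initial_players new_players rank _ _
  unfold Spec_getMinimumHealth getMinimumHealth getMinimumHealth_alt
  show pvALoop rank (pvCanon (initial_players ++ new_players)) new_players.reverse
      (pvT rank (initial_players ++ new_players))
    = pvBLoop rank (pvCanon initial_players) new_players (pvT rank initial_players)
  have h1 : initial_players ++ new_players = initial_players ++ new_players.reverse.reverse := by
    rw [List.reverse_reverse]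
  rw [h1, pvALoop_eq, ← h1, pvSum_rev, pvBLoop_eq]
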